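-- pv_equiv track=rewrite | github.com/JunHyeok-Jang/programmers_algorithm_solution | hash/hash3.py | solution
-- ===== SOURCE A (Python) =====
-- def solution(clothes):
--     category = []
--     count_list = []
--     for i in range(len(clothes)):
--         category.append(clothes[i][1])
--
--     for i in set(category):
--         count_list.append(category.count(i))
--
--     answer = 1
--     for i in range(len(count_list)):
--         answer = answer * (count_list[i] + 1)
--     return answer - 1
-- ===== SOURCE B (Python) =====
-- def solution(clothes):
--     def prod(cats):
--         if not cats:
--             return 1
--         first = cats[0]
--         rest = [c for c in cats if c != first]
--         return (len(cats) - len(rest) + 1) * prod(rest)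
--     return prod([row[1] for row in clothes]) - 1
-- ===== Notes on version B (the rewrite author's own statement) =====
-- stated objective: alternative
-- what changed: Replaced the set + repeated list.count tally and index-loop product with a recursive partition: take the first category, filter all its occurrences out, derive its count from the length drop, and multiply by the recursive product of the remainder.
import Mathlib
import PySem

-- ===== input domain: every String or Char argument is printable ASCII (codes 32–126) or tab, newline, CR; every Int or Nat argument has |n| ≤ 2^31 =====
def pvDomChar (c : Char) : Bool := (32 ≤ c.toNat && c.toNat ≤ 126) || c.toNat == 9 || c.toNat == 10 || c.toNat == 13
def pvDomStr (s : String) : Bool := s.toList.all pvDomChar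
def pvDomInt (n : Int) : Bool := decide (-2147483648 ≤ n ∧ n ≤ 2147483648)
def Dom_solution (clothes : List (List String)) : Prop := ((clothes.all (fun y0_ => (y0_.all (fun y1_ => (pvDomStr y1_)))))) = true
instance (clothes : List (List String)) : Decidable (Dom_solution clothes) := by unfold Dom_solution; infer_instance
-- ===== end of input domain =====

-- B replaces A's set + repeated .count tally and index-loop product by a recursive partition:
-- peel off the first category, filter it out, read its count off the length drop, recurse.

-- ===== PORT A =====
def solution (clothes : List (List String)) : Int :=
  let category := (PySem.List.pyRange 0 (PySem.List.len clothes)).foldl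
      (fun acc i => acc ++ [PySem.List.pyGetD (PySem.List.pyGetD clothes i []) 1 ""]) []
  let count_list : List Int := (PySem.Set.ofList category).foldl
      (fun acc i => acc ++ [(category.count i : Int)]) []
  let answer := (PySem.List.pyRange 0 (PySem.List.len count_list)).foldl
      (fun acc i => acc * (PySem.List.pyGetD count_list i 0 + 1)) 1
  answer - 1

-- ===== PORT B =====
-- helper 'prod' of Source B: recursion on the category list, filtering out the head's category
def prodRec : List String → Int
  | [] => 1
  | first :: cs =>
    let rest := (first :: cs).filter (fun c => c ≠ first)
    (((first :: cs).length : Int) - (rest.length : Int) + 1) * prodRec rest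
termination_by l => l.length
decreasing_by
  simp only [List.filter_cons, decide_not]
  simp
  exact List.length_filter_le _ _

def solution_alt (clothes : List (List String)) : Int :=
  prodRec (clothes.map (fun row => PySem.List.pyGetD row 1 "")) - 1

-- ===== PRECONDITION & SPEC =====
-- Pre_ excludes inputs containing a row with fewer than 2 entries, on which A raises IndexError at clothes[i][1] (B raises there too).
def Pre_solution (clothes : List (List String)) : Prop := ∀ row ∈ clothes, 2 ≤ row.length
instance (clothes : List (List String)) : Decidable (Pre_solution clothes) := by unfold Pre_solution; infer_instance
def pvWitness_solution : List (List String) := [["a", "hat"], ["b", "hat"], ["c", "shoe"]]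
def Spec_solution (clothes : List (List String)) (out : Int) : Prop := out = solution_alt clothes
instance (clothes : List (List String)) (out : Int) : Decidable (Spec_solution clothes out) := by unfold Spec_solution; infer_instance

-- ===== CLAIM =====
def Claim_equal_solution : Prop := ∀ (clothes : List (List String)), Dom_solution clothes → Pre_solution clothes → Spec_solution clothes (solution clothes)

-- ===== LEMMAS AND PROOFS =====

-- canonical form: product over the distinct categories of (count + 1)
def canonProd (l : List String) : Int := ∏ c ∈ l.toFinset, ((l.count c : Int) + 1)


theorem prodRec_eq_canon (l : List String) : prodRec l = canonProd l := by
  induction l using prodRec.induct with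
  | case1 => simp [prodRec, canonProd]
  | case2 first cs rest ih =>
    rw [prodRec]
    simp only [] at *
    rw [ih]
    have hlen : (first :: cs).length = rest.length + (first :: cs).count first := by
      rw [List.count_eq_length_filter,
        List.length_eq_length_filter_add (l := first :: cs) (fun c => decide (c ≠ first))]
      have hfun : (fun x : String => x == first) = (fun x => decide (x = first)) := by
        funext x; cases h : x == first <;> simp_all
      simp [rest, hfun]
    have hcnt : ((first :: cs).count first : Int) =
        ((first :: cs).length : Int) - (rest.length : Int) := by omega
    have hmem : first ∈ (first :: cs).toFinset := by simp
    have htf : rest.toFinset = (first :: cs).toFinset.erase first := by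
      ext x
      simp [rest, Finset.mem_erase, and_comm]
    have hstep : canonProd (first :: cs)
        = (((first :: cs).count first : Int) + 1) *
          ∏ x ∈ (first :: cs).toFinset.erase first, (((first :: cs).count x : Int) + 1) := by
      exact (Finset.mul_prod_erase _ _ hmem).symm
    rw [hstep, hcnt]
    congr 1
    rw [← htf]
    unfold canonProd
    refine Finset.prod_congr rfl ?_
    intro x hx
    have hxne : x ≠ first := by
      rw [htf] at hx
      exact (Finset.mem_erase.mp hx).1
    have : rest.count x = (first :: cs).count x := by
      rw [show rest = (first :: cs).filter (fun c => decide (c ≠ first)) from rfl,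
        List.count_filter]
      simp [hxne]
    rw [this]

theorem solution_eq_canon (clothes : List (List String)) :
    solution clothes = canonProd (clothes.map (fun row => PySem.List.pyGetD row 1 "")) - 1 := by
  unfold solution
  rw [PySem.List.foldl_pyRange_pyGetD clothes [] (fun acc r => acc ++ [PySem.List.pyGetD r 1 ""]) [] le_rfl]
  simp only [Int.toNat_zero, List.drop_zero]
  rw [PySem.List.foldl_append_singleton_eq_map, List.nil_append,
    PySem.List.foldl_append_singleton_eq_map, List.nil_append,
    PySem.List.foldl_pyRange_pyGetD _ 0 (fun acc c => acc * (c + 1)) 1 le_rfl]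
  simp only [Int.toNat_zero, List.drop_zero]
  set cats := clothes.map (fun row => PySem.List.pyGetD row 1 "") with hcats
  have hfold : ∀ (xs : List Int),
      xs.foldl (fun a c => a * (c + 1)) 1 = (xs.map (fun c => c + 1)).prod := by
    intro xs
    rw [List.prod_eq_foldl, List.foldl_map]
  rw [hfold, List.map_map]
  have hfin : (PySem.Set.ofList cats).toFinset = cats.toFinset := by
    ext x
    simp [PySem.Set.mem_ofList]
  unfold canonProd
  rw [← hfin, List.prod_toFinset _ (PySem.Set.nodup_ofList cats)]
  rfl

-- ===== VERDICT =====
theorem solution_spec : Claim_equal_solution := by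
  intro clothes _ _
  unfold Spec_solution solution_alt
  rw [solution_eq_canon, prodRec_eq_canon]
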